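-- pv_equiv track=rewrite | github.com/ShoCo2/Google-Foobar-Answers | Level 2/EnRouteSalute.py | solution
-- ===== SOURCE A (Python) =====
-- def solution(s):
--     ind = 0
--     cross = 0
--     cached = 0
--     while ind < len(s):
--         if s[ind] == '>':
--             cached += 1
--         elif s[ind] == '<':
--             cross += cached
--         ind += 1
--     return cross * 2
-- ===== SOURCE B (Python) =====
-- def solution(s):
--     total = 0
--     n = len(s)
--     for i in range(n):
--         if s[i] == '>':
--             for j in range(i + 1, n):
--                 if s[j] == '<':
--                     total += 1
--     return total * 2
-- ===== Notes on version B (the rewrite author's own statement) =====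
-- stated objective: alternative
-- what changed: Replaced the single running-count pass (cached '>' count added on each '<') with a nested double loop: for each '>' scan the suffix and count every '<', accumulating the pair count directly.
import Mathlib
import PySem

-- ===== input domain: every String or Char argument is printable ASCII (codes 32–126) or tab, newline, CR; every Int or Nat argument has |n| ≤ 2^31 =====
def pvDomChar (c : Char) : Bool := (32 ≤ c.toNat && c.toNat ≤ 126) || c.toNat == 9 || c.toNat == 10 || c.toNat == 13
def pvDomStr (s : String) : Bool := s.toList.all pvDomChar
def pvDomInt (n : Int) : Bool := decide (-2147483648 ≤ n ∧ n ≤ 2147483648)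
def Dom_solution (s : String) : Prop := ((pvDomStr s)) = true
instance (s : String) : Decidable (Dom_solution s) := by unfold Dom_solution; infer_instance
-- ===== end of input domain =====

-- B replaces A's single running-count pass by a nested double loop (for each '>', scan the suffix counting '<'); alternative decomposition, not faster.

-- ===== PORT A =====
-- while loop over indices, carrying the running '>' count (cached) and the pair count (cross)
def loopA : List Char → Int → Int → Int
  | [], _, cross => cross
  | c :: rest, cached, cross =>
    if c = '>' then loopA rest (cached + 1) cross
    else if c = '<' then loopA rest cached (cross + cached)
    else loopA rest cached cross

def solution (s : String) : Int := loopA s.toList 0 0 * 2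

-- ===== PORT B =====
-- inner loop: for j in range(i+1, n): count '<'
def innerB : List Char → Int
  | [] => 0
  | c :: rest => (if c = '<' then 1 else 0) + innerB rest

-- outer loop: for i in range(n): if s[i] == '>', add the inner scan's count
def outerB : List Char → Int
  | [] => 0
  | c :: rest => (if c = '>' then innerB rest else 0) + outerB rest

def solution_alt (s : String) : Int := outerB s.toList * 2

-- ===== PRECONDITION & SPEC =====
def Spec_solution (s : String) (out : Int) : Prop := out = solution_alt s
instance (s : String) (out : Int) : Decidable (Spec_solution s out) := by unfold Spec_solution; infer_instance

-- ===== CLAIM (what is proved, stated in full; the proofs are below) =====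
def Claim_equal_solution : Prop := ∀ (s : String), Dom_solution s → Spec_solution s (solution s)

-- ===== LEMMAS AND PROOFS =====
-- Loop invariant: A's loop result equals cross + cached · (#'<' in the rest) + B's nested count.
theorem loopA_eq (l : List Char) : ∀ cached cross : Int,
    loopA l cached cross = cross + cached * innerB l + outerB l := by
  induction l with
  | nil => intro cached cross; simp [loopA, innerB, outerB]
  | cons c rest ih =>
    intro cached cross
    by_cases h1 : c = '>'
    · simp [loopA, innerB, outerB, h1, ih]; ring
    · by_cases h2 : c = '<'
      · simp [loopA, innerB, outerB, h2, ih]; ring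
      · simp [loopA, innerB, outerB, h1, h2, ih]

-- ===== VERDICT (by name: the statement is the Claim_ definition above) =====
theorem solution_spec : Claim_equal_solution := by
  intro s _
  unfold Spec_solution solution solution_alt
  rw [loopA_eq]
  ring
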